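-- pv_equiv track=rewrite | github.com/neyaki/aoc | 2022/solutions/day6.py | find_unique_set
-- ===== SOURCE A (Python) =====
-- def find_unique_set(lst: list, set_size: int) -> int:
--     for line in lst:
--         pt = 0  # set pointer
--         for l in line:
--             if len(line[pt:pt+set_size]) == len(set(line[pt:pt+set_size])):
--                 return len(line[:pt+set_size])
--             else:
--                 pt += 1
-- ===== SOURCE B (Python) =====
-- def find_unique_set(lst: list, set_size: int) -> int:
--     for line in lst:
--         if not line:
--             continue
--         last = {}
--         start = 0
--         for i, c in enumerate(line):
--             p = last.get(c, -1)
--             if p >= start: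
--                 start = p + 1
--             last[c] = i
--             if i + 1 - start == set_size:
--                 return i + 1
--         return len(line)
-- ===== Notes on version B (the rewrite author's own statement) =====
-- stated objective: alternative
-- what changed: Replaces re-slicing and re-building a set for every pointer position with a single sliding-window pass keeping a last-occurrence map and a window start, returning the first window end directly.
-- outside the precondition, e.g. on find_unique_set(['abc'], 0): A returns 0, B returns 3; on find_unique_set(['abc'], -1): A returns 2, B returns 3
import Mathlib
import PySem

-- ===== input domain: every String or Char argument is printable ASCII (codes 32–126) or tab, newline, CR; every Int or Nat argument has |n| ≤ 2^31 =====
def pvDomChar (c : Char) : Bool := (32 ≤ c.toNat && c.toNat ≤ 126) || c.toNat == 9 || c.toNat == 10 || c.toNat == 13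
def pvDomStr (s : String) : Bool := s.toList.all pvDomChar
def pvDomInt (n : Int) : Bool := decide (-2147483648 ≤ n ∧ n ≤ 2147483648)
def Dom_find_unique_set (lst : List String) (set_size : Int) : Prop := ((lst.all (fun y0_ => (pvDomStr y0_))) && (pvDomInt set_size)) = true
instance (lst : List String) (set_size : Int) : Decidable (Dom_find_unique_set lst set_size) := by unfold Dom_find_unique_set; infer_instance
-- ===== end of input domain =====

-- B replaces A's per-position slice-and-set rebuild with one sliding-window pass per line
-- keeping a last-occurrence map and a moving window start (objective: alternative).

-- ===== PORT A =====
-- inner 'for l in line' loop: pt starts at 0 and is bumped on every failed window test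
def pvALoop (line : List Char) (k : Int) : List Char → Int → Option Int
  | [], _ => none
  | _ :: rest, pt =>
      let w := PySem.List.slice line (some pt) (some (pt + k))
      if w.length == (PySem.Set.ofList w).length then
        some ((PySem.List.slice line none (some (pt + k))).length : Int)
      else
        pvALoop line k rest (pt + 1)

def find_unique_set (lst : List String) (set_size : Int) : Option Int :=
  match lst with
  | [] => none
  | line :: rest =>
      match pvALoop line.toList set_size line.toList 0 with
      | some r => some r
      | none => find_unique_set rest set_size

-- ===== PORT B =====
-- sliding window over enumerate(line): last = last-occurrence dict, start = window start
def pvBLoop (k : Int) (n : Int) : List (Int × Char) → PySem.Dict Char Int → Int → Int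
  | [], _, _ => n
  | (i, c) :: rest, last, start =>
      let p := last.getD c (-1)
      let start' := if p ≥ start then p + 1 else start
      let last' := last.insert c i
      if i + 1 - start' == k then i + 1 else pvBLoop k n rest last' start'

def find_unique_set_alt (lst : List String) (set_size : Int) : Option Int :=
  match lst with
  | [] => none
  | line :: rest =>
      if line.toList = [] then find_unique_set_alt rest set_size
      else some (pvBLoop set_size (line.toList.length : Int)
                   (PySem.List.enumerate line.toList 0) PySem.Dict.empty 0)

-- ===== PRECONDITION & SPEC =====
-- Pre_ restricts to the task's natural domain set_size ≥ 1: for set_size ≤ 0 (not a meaningful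
-- window size) A returns a value that is an accident of Python slice arithmetic
-- (e.g. A(["abc"], 0) = 0, A(["abc"], -1) = 2) while B naturally returns the line length.
def Pre_find_unique_set (lst : List String) (set_size : Int) : Prop := 1 ≤ set_size
instance (lst : List String) (set_size : Int) : Decidable (Pre_find_unique_set lst set_size) := by
  unfold Pre_find_unique_set; infer_instance

def pvWitness_find_unique_set : List String × Int := (["abcabd"], 3)

def Spec_find_unique_set (lst : List String) (set_size : Int) (out : Option Int) : Prop := out = find_unique_set_alt lst set_size
instance (lst : List String) (set_size : Int) (out : Option Int) : Decidable (Spec_find_unique_set lst set_size out) := by unfold Spec_find_unique_set; infer_instance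

-- ===== CLAIM (what is proved, stated in full; the proofs are below) =====
def Claim_equal_find_unique_set : Prop := ∀ (lst : List String) (set_size : Int), Dom_find_unique_set lst set_size → Pre_find_unique_set lst set_size → Spec_find_unique_set lst set_size (find_unique_set lst set_size)

-- ===== LEMMAS AND PROOFS =====

-- window at position t: the characters line[t : t+k]
def pvWin (cs : List Char) (kn t : Nat) : List Char := (cs.drop t).take kn

-- position t is "good": the window of size kn starting at t has pairwise-distinct characters
abbrev pvGood (cs : List Char) (kn t : Nat) : Prop := (pvWin cs kn t).Nodup

theorem pvNodup_of_short (l : List Char) (h : l.length ≤ 1) : l.Nodup := by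
  match l, h with
  | [], _ => exact List.nodup_nil
  | [a], _ => exact List.nodup_singleton a

theorem pvGood_last (cs : List Char) (kn : Nat) : pvGood cs kn (cs.length - 1) := by
  apply pvNodup_of_short
  simp [pvWin]
  omega

-- the first good position exists
theorem pvGoodEx (cs : List Char) (kn : Nat) : ∃ t, pvGood cs kn t :=
  ⟨cs.length - 1, pvGood_last cs kn⟩

noncomputable def pvStar (cs : List Char) (kn : Nat) : Nat :=
  Nat.find (pvGoodEx cs kn)

-- 'len(set(w)) == len(w)' is exactly 'w has no duplicates'
theorem pvSetLen_iff (w : List Char) : (PySem.Set.ofList w).length = w.length ↔ w.Nodup := by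
  constructor
  · intro h
    have hf : (PySem.Set.ofList w).toFinset = w.toFinset := by
      apply Finset.ext
      intro a
      simp [List.mem_toFinset, PySem.Set.mem_ofList]
    have h1 : (PySem.Set.ofList w).toFinset.card = (PySem.Set.ofList w).length :=
      List.toFinset_card_of_nodup (PySem.Set.nodup_ofList w)
    have h2 : w.toFinset.card = w.length := by rw [← hf, h1, h]
    have h3 : w.dedup.length = w.length := by rw [← List.card_toFinset, h2]
    have h4 : w.dedup = w := (w.dedup_sublist).eq_of_length h3
    rw [← List.dedup_eq_self]; exact h4
  · intro h
    rw [PySem.Set.ofList_eq_self_of_nodup w h]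

-- A's loop returns min(len, pt* + k) at the first good position
theorem pvA_run (cs : List Char) (k : Int) (hk : 1 ≤ k) (hne : cs ≠ [])
    (rem : List Char) (pt : Nat) (hlen : pt + rem.length = cs.length)
    (hbad : ∀ t < pt, ¬ pvGood cs k.toNat t) :
    pvALoop cs k rem (pt : Int) =
      some ((min cs.length (pvStar cs k.toNat + k.toNat) : Nat) : Int) := by
  induction rem generalizing pt with
  | nil =>
      exfalso
      have h0 : 0 < cs.length := List.length_pos_of_ne_nil hne
      have h1 : cs.length - 1 < pt := by simp at hlen; omega
      exact hbad _ h1 (pvGood_last cs k.toNat)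
  | cons x rest ih =>
      have hkk : (pt : Int) + k = ((pt + k.toNat : Nat) : Int) := by push_cast; omega
      have hw : PySem.List.slice cs (some (pt : Int)) (some ((pt : Int) + k)) = pvWin cs k.toNat pt := by
        rw [hkk, PySem.List.slice_natCast]
        simp [pvWin]
      by_cases hg : pvGood cs k.toNat pt
      · have hstar : pvStar cs k.toNat = pt := (Nat.find_eq_iff _).mpr ⟨hg, hbad⟩
        simp only [pvALoop, hw]
        rw [if_pos (by simp [(pvSetLen_iff _).mpr hg])]
        rw [hkk, PySem.List.slice_to_natCast]
        simp [hstar]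
        omega
      · simp only [pvALoop, hw]
        rw [if_neg (by
          simp only [beq_iff_eq]
          intro hcon
          exact hg ((pvSetLen_iff _).mp hcon.symm))]
        have hc : (pt : Int) + 1 = ((pt + 1 : Nat) : Int) := by push_cast; ring
        rw [hc]
        apply ih
        · simp at hlen ⊢; omega
        · intro t ht
          rcases Nat.lt_succ_iff_lt_or_eq.mp ht with h | h
          · exact hbad t h
          · subst h; exact hg

-- B's loop invariant: d maps each seen character to its last occurrence, start is the
-- smallest index whose window up to i is duplicate-free
theorem pvB_run (cs : List Char) (k : Int) (hk : 1 ≤ k)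
    (i s : Nat) (d : PySem.Dict Char Int)
    (hsi : s ≤ i) (hin : i ≤ cs.length)
    (hwin : ((cs.drop s).take (i - s)).Nodup)
    (hbad : ∀ t < s, ¬ pvGood cs k.toNat t)
    (hsz : i - s < k.toNat)
    (hd : ∀ c : Char, match d.get? c with
          | none => ∀ j, j < i → (hj2 : j < cs.length) → cs[j] ≠ c
          | some p => ∃ pn : Nat, p = (pn : Int) ∧ pn < i ∧ ∃ hp : pn < cs.length, cs[pn] = c ∧
              ∀ j, pn < j → j < i → (hj2 : j < cs.length) → cs[j] ≠ c) :
    pvBLoop k (cs.length : Int) (PySem.List.enumerate (cs.drop i) (i : Int)) d (s : Int) =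
      ((min cs.length (pvStar cs k.toNat + k.toNat) : Nat) : Int) := by
  induction hfuel : cs.length - i generalizing i s d with
  | zero =>
      have hieq : i = cs.length := by omega
      subst hieq
      rw [List.drop_length, PySem.List.enumerate_nil]
      have hstar_ge : s ≤ pvStar cs k.toNat := by
        by_contra h
        rw [not_le] at h
        exact hbad _ h (Nat.find_spec (pvGoodEx cs k.toNat))
      have hmin : min cs.length (pvStar cs k.toNat + k.toNat) = cs.length := by omega
      rw [hmin]
      rfl
  | succ m ih =>
      have hlt : i < cs.length := by omega
      have hdrop : cs.drop i = cs[i] :: cs.drop (i + 1) := List.drop_eq_getElem_cons hlt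
      rw [hdrop, PySem.List.enumerate_cons]
      simp only [pvBLoop]
      -- abstract facts about the new window start s'
      obtain ⟨s', hs'eq, hss', hs'i, hnotin, hbad2⟩ :
          ∃ s' : Nat,
            (if d.getD cs[i] (-1) ≥ (s : Int) then d.getD cs[i] (-1) + 1 else (s : Int)) = (s' : Int) ∧
            s ≤ s' ∧ s' ≤ i ∧
            (∀ j, s' ≤ j → j < i → ∀ (hj2 : j < cs.length), cs[j] ≠ cs[i]) ∧
            (∀ t, s ≤ t → t < s' → ¬ pvGood cs k.toNat t) := by
        have hspec := hd cs[i]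
        cases hget : d.get? cs[i] with
        | none =>
            rw [hget] at hspec
            refine ⟨s, ?_, le_refl s, hsi, ?_, ?_⟩
            · have h9 : d.getD cs[i] (-1) = -1 := by
                show (d.get? cs[i]).getD (-1) = -1
                rw [hget]; rfl
              rw [h9]
              rw [if_neg (show ¬((-1 : Int) ≥ (s : Int)) by omega)]
            · intro j _ hji hj2 he
              exact hspec j hji hj2 he
            · intro t h1 h2; exact absurd h2 (by omega)
        | some p =>
            rw [hget] at hspec
            obtain ⟨pn, hpeq, hpi, hp, hpc, hlast⟩ := hspec
            have hgetD : d.getD cs[i] (-1) = (pn : Int) := by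
              show (d.get? cs[i]).getD (-1) = (pn : Int)
              rw [hget, hpeq]; rfl
            -- a window of size < k.toNat containing both pn and i has a duplicate
            have hdup : ∀ t, t ≤ pn → i - t < k.toNat → ¬ pvGood cs k.toNat t := by
              intro t htp hik hnd
              have l1 : pn - t < (pvWin cs k.toNat t).length := by simp [pvWin]; omega
              have l2 : i - t < (pvWin cs k.toNat t).length := by simp [pvWin]; omega
              have e1 : (pvWin cs k.toNat t)[pn - t] = cs[t + (pn - t)]'(by omega) := by
                simp [pvWin, List.getElem_take, List.getElem_drop]
              have e2 : (pvWin cs k.toNat t)[i - t] = cs[t + (i - t)]'(by omega) := by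
                simp [pvWin, List.getElem_take, List.getElem_drop]
              have e1' : (pvWin cs k.toNat t)[pn - t] = cs[i] := by
                rw [e1, ← hpc]
                have hidx : t + (pn - t) = pn := by omega
                exact getElem_congr rfl hidx (by omega)
              have e2' : (pvWin cs k.toNat t)[i - t] = cs[i] := by
                rw [e2]
                have hidx : t + (i - t) = i := by omega
                exact getElem_congr rfl hidx (by omega)
              have := (List.Nodup.getElem_inj_iff hnd).mp (e1'.trans e2'.symm)
              omega
            by_cases hps : s ≤ pn
            · refine ⟨pn + 1, ?_, by omega, by omega, ?_, ?_⟩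
              · rw [hgetD]
                rw [if_pos (show ((pn : Int) ≥ (s : Int)) by omega)]
                push_cast; ring
              · intro j hj1 hj2 hj3 he
                exact hlast j (by omega) hj2 hj3 he
              · intro t h1 h2
                exact hdup t (by omega) (by omega)
            · refine ⟨s, ?_, le_refl s, hsi, ?_, ?_⟩
              · rw [hgetD]
                rw [if_neg (show ¬((pn : Int) ≥ (s : Int)) by omega)]
              · intro j hj1 hj2 hj3 he
                exact hlast j (by omega) hj2 hj3 he
              · intro t h1 h2; exact absurd h2 (by omega)
      rw [hs'eq]
      -- the extended window [s', i+1) is duplicate-free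
      have hsplit : (cs.drop s').take (i + 1 - s') = (cs.drop s').take (i - s') ++ [cs[i]] := by
        have h1 : i + 1 - s' = (i - s') + 1 := by omega
        rw [h1, List.take_add_one]
        congr 1
        have h2 : (cs.drop s')[i - s']? = some cs[i] := by
          rw [List.getElem?_drop]
          have h3 : s' + (i - s') = i := by omega
          rw [h3, List.getElem?_eq_getElem hlt]
        rw [h2]
        rfl
      have hold : ((cs.drop s').take (i - s')).Nodup := by
        have heq : (cs.drop s').take (i - s') = ((cs.drop s).take (i - s)).drop (s' - s) := by
          have h4 : (i - s) - (s' - s) = i - s' := by omega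
          have h5 : s + (s' - s) = s' := by omega
          rw [List.drop_take, List.drop_drop, h4, h5]
        rw [heq]
        exact hwin.sublist (List.drop_sublist _ _)
      have hmem : cs[i] ∉ (cs.drop s').take (i - s') := by
        intro hmem
        obtain ⟨j, hj, he⟩ := List.mem_iff_getElem.mp hmem
        have hjlt : j < i - s' := by
          have := hj; simp [List.length_take, List.length_drop] at this; omega
        have hjlen : s' + j < cs.length := by
          have := hj; simp [List.length_take, List.length_drop] at this; omega
        have he2 : cs[s' + j]'hjlen = cs[i] := by
          rw [← he, List.getElem_take, List.getElem_drop]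
        exact hnotin (s' + j) (by omega) (by omega) hjlen he2
      have hwin' : ((cs.drop s').take (i + 1 - s')).Nodup := by
        rw [hsplit]
        simp [List.nodup_append, hold]
        intro a ha hae
        exact hmem (hae ▸ ha)
      have hbad' : ∀ t < s', ¬ pvGood cs k.toNat t := by
        intro t ht
        by_cases hts : t < s
        · exact hbad t hts
        · exact hbad2 t (by omega) ht
      have hszle : i + 1 - s' ≤ k.toNat := by
        by_cases hps : s' = s
        · omega
        · omega
      -- the return test
      by_cases htest : (i : Int) + 1 - (s' : Int) = k
      · rw [if_pos (by exact beq_iff_eq.mpr htest)]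
        have hks : i + 1 - s' = k.toNat := by omega
        have hgood : pvGood cs k.toNat s' := by
          have : pvWin cs k.toNat s' = (cs.drop s').take (i + 1 - s') := by
            rw [pvWin, hks]
          rw [pvGood, this]
          exact hwin'
        have hstar : pvStar cs k.toNat = s' := (Nat.find_eq_iff _).mpr ⟨hgood, hbad'⟩
        have hmin : min cs.length (pvStar cs k.toNat + k.toNat) = i + 1 := by
          rw [hstar]; omega
        rw [hmin]
        push_cast
        ring
      · rw [if_neg (by simpa using htest)]
        have hc1 : (i : Int) + 1 = ((i + 1 : Nat) : Int) := by push_cast; ring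
        rw [hc1]
        apply ih (i + 1) s' (d.insert cs[i] (i : Int)) (by omega) (by omega) hwin' hbad'
          (by omega) ?_ (by omega)
        intro c2
        by_cases hc2 : c2 = cs[i]
        · subst hc2
          rw [PySem.Dict.get?_insert_self]
          exact ⟨i, rfl, by omega, hlt, rfl, by intro j h1 h2 _ ; omega⟩
        · rw [PySem.Dict.get?_insert_of_ne _ _ hc2]
          have hspec := hd c2
          cases hget : d.get? c2 with
          | none =>
              rw [hget] at hspec
              intro j hj1 hj2 he
              by_cases hji : j < i
              · exact hspec j hji hj2 he
              · have : j = i := by omega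
                subst this
                exact hc2 he.symm
          | some p =>
              rw [hget] at hspec
              obtain ⟨pn, hpeq, hpi, hp, hpc, hlast⟩ := hspec
              refine ⟨pn, hpeq, by omega, hp, hpc, ?_⟩
              intro j hj1 hj2 hj3 he
              by_cases hji : j < i
              · exact hlast j hj1 hji hj3 he
              · have : j = i := by omega
                subst this
                exact hc2 (by rw [← he])

-- ===== VERDICT (by name: the statement is the Claim_ definition above) =====
theorem find_unique_set_spec : Claim_equal_find_unique_set := by
  intro lst k hdom hpre
  unfold Spec_find_unique_set
  have hk : 1 ≤ k := hpre
  induction lst with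
  | nil => rfl
  | cons line rest ih =>
      have hdom' : Dom_find_unique_set rest k := by
        unfold Dom_find_unique_set at hdom ⊢
        simp only [List.all_cons, Bool.and_eq_true] at hdom ⊢
        exact ⟨hdom.1.2, hdom.2⟩
      have hih := ih hdom' hpre
      by_cases hnil : line.toList = []
      · simp only [find_unique_set, find_unique_set_alt, hnil, if_pos, pvALoop]
        exact hih
      · have hA := pvA_run line.toList k hk hnil line.toList 0 (by simp)
          (by intro t ht; exact absurd ht (by omega))
        have hB := pvB_run line.toList k hk 0 0 PySem.Dict.empty (le_refl 0) (by simp)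
          (by simp) (by intro t ht; exact absurd ht (by omega)) (by omega)
          (by
            intro c
            simp only [PySem.Dict.get?_empty]
            intro j hj
            exact absurd hj (by omega))
        simp only [Nat.cast_zero] at hA
        rw [List.drop_zero, Nat.cast_zero] at hB
        simp only [find_unique_set, find_unique_set_alt, if_neg hnil, hA, hB]
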